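-- pv_equiv track=rewrite | github.com/jberends/xppkg | xppkg/util.py | has_leading_dir
-- ===== SOURCE A (Python) =====
-- def split_leading_dir(path):
--     path = str(path)
--     path = path.lstrip('/').lstrip('\\')
--     if '/' in path and (('\\' in path and path.find('/') < path.find('\\'))
--                         or '\\' not in path):
--         return path.split('/', 1)
--     elif '\\' in path:
--         return path.split('\\', 1)
--     else:
--         return path, ''
--
-- def has_leading_dir(paths):
--     """Returns true if all the paths have the same leading path name
--     (i.e., everything is in one subdirectory in an archive)"""
--     common_prefix = None
--     for path in paths:
--         prefix, rest = split_leading_dir(path)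
--         if not prefix:
--             return False
--         elif common_prefix is None:
--             common_prefix = prefix
--         elif prefix != common_prefix:
--             return False
--     return True
-- ===== SOURCE B (Python) =====
-- def split_leading_dir(path):
--     path = str(path)
--     path = path.lstrip('/').lstrip('\\')
--     if '/' in path and (('\\' in path and path.find('/') < path.find('\\'))
--                         or '\\' not in path):
--         return path.split('/', 1)
--     elif '\\' in path:
--         return path.split('\\', 1)
--     else:
--         return path, ''
--
-- def has_leading_dir(paths):
--     """Returns true if all the paths have the same leading path name
--     (i.e., everything is in one subdirectory in an archive)"""
--     prefixes = [split_leading_dir(p)[0] for p in paths]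
--     if not prefixes:
--         return True
--     lo, hi = min(prefixes), max(prefixes)
--     return lo != '' and lo == hi
-- ===== Notes on version B (the rewrite author's own statement) =====
-- stated objective: alternative
-- what changed: Replaces A's stateful scan with a running common_prefix and early returns by an order-statistics formulation: collect all leading prefixes, take their min and max under string ordering, and answer lo != '' and lo == hi (all-equal iff the two extremes coincide).
import Mathlib
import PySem

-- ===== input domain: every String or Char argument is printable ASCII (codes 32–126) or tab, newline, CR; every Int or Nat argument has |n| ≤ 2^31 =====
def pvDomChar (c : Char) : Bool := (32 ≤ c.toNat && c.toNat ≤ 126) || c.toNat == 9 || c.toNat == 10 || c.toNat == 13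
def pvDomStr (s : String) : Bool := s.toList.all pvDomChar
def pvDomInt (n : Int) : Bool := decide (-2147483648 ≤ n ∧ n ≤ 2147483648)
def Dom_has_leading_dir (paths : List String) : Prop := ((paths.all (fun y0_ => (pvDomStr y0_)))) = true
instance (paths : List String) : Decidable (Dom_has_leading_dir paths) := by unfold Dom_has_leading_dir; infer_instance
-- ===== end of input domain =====

-- B replaces A's running common_prefix scan with early exit by an order-statistics check:
-- min and max of the prefix list coincide and are nonempty; objective: alternative.

-- ===== PORT A =====
-- shared helper, used verbatim by both Pythons: split_leading_dir(path)
-- (str(path) is the identity on a str argument; lstrip('/') with a one-char set is exactly dropWhile)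
def splitLeadingDir (path : List Char) : List Char × List Char :=
  let p := (path.dropWhile (· == '/')).dropWhile (· == '\\')
  if PySem.Chars.isIn ['/'] p &&
     ((PySem.Chars.isIn ['\\'] p && decide (PySem.Chars.find p ['/'] < PySem.Chars.find p ['\\']))
       || !(PySem.Chars.isIn ['\\'] p)) then
    match PySem.Chars.splitOnMax p ['/'] 1 with
    | a :: b :: _ => (a, b)
    | _ => (p, [])   -- unreachable: '/' occurs in p, so the split has two pieces
  else if PySem.Chars.isIn ['\\'] p then
    match PySem.Chars.splitOnMax p ['\\'] 1 with
    | a :: b :: _ => (a, b)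
    | _ => (p, [])   -- unreachable likewise
  else (p, [])

-- A's loop: common_prefix starts as None, early return on empty or mismatching prefix
def hasLeadingLoop : List String → Option (List Char) → Bool
  | [], _ => true
  | path :: rest, common =>
    let pr := splitLeadingDir path.toList
    if pr.1 = [] then false
    else
      match common with
      | none => hasLeadingLoop rest (some pr.1)
      | some c => if pr.1 ≠ c then false else hasLeadingLoop rest (some c)

def has_leading_dir (paths : List String) : Bool :=
  hasLeadingLoop paths none

-- ===== PORT B =====
-- B: the list of leading prefixes; empty list → True, else min ≠ '' and min = max
def has_leading_dir_alt (paths : List String) : Bool :=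
  let prefixes := paths.map (fun p => String.mk (splitLeadingDir p.toList).1)
  match PySem.List.min? prefixes (fun x => x), PySem.List.max? prefixes (fun x => x) with
  | some lo, some hi => decide (lo ≠ "" ∧ lo = hi)
  | _, _ => true

-- ===== PRECONDITION & SPEC =====
def Spec_has_leading_dir (paths : List String) (out : Bool) : Prop := out = has_leading_dir_alt paths
instance (paths : List String) (out : Bool) : Decidable (Spec_has_leading_dir paths out) := by unfold Spec_has_leading_dir; infer_instance

-- ===== CLAIM =====
def Claim_equal_has_leading_dir : Prop := ∀ (paths : List String), Dom_has_leading_dir paths → Spec_has_leading_dir paths (has_leading_dir paths)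

-- ===== LEMMAS AND PROOFS =====

-- A's loop once the common prefix is fixed at c
theorem loop_some_iff (paths : List String) (c : List Char) :
    hasLeadingLoop paths (some c) = true ↔
      ∀ p ∈ paths, (splitLeadingDir p.toList).1 ≠ [] ∧ (splitLeadingDir p.toList).1 = c := by
  induction paths with
  | nil => simp [hasLeadingLoop]
  | cons p rest ih =>
    simp only [hasLeadingLoop, List.mem_cons]
    split_ifs with h1 h2 <;> simp_all

-- A's whole loop (common_prefix = None at the start)
theorem loop_none_iff (paths : List String) :
    hasLeadingLoop paths none = true ↔
      ∀ p ∈ paths, (splitLeadingDir p.toList).1 ≠ [] ∧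
        ∀ q ∈ paths, (splitLeadingDir q.toList).1 = (splitLeadingDir p.toList).1 := by
  cases paths with
  | nil => simp [hasLeadingLoop]
  | cons p rest =>
    simp only [hasLeadingLoop, List.mem_cons]
    split_ifs with h1
    · simp_all
    · rw [loop_some_iff]
      constructor
      · intro h q hq
        rcases hq with rfl | hq
        · refine ⟨h1, ?_⟩
          rintro r (rfl | hr)
          · rfl
          · exact (h r hr).2
        · refine ⟨(h q hq).1, ?_⟩
          rintro r (rfl | hr)
          · rw [(h q hq).2]
          · rw [(h r hr).2, (h q hq).2]
      · intro h q hq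
        refine ⟨(h q (Or.inr hq)).1, ?_⟩
        rw [(h p (Or.inl rfl)).2 q (Or.inr hq)]

-- String.mk is injective, via toList
theorem pvMkToList (l : List Char) : (String.mk l).toList = l :=
  Eq.symm ((fun {_} {_} => String.ofList_eq.mp) rfl)

-- B's boolean, characterised: min = max ≠ '' iff all prefixes are nonempty and equal
theorem alt_iff (paths : List String) :
    has_leading_dir_alt paths = true ↔
      ∀ p ∈ paths, (splitLeadingDir p.toList).1 ≠ [] ∧
        ∀ q ∈ paths, (splitLeadingDir q.toList).1 = (splitLeadingDir p.toList).1 := by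
  unfold has_leading_dir_alt
  cases paths with
  | nil => simp [PySem.List.min?, PySem.List.max?]
  | cons x t =>
    set L := (x :: t).map (fun p => String.mk (splitLeadingDir p.toList).1) with hL
    have hne : L ≠ [] := by simp [hL]
    obtain ⟨lo, hlo⟩ : ∃ m, PySem.List.min? L (fun x => x) = some m := by
      cases h : PySem.List.min? L (fun x => x) with
      | none => exact absurd ((PySem.List.min?_eq_none_iff L (fun x => x)).mp h) hne
      | some m => exact ⟨m, rfl⟩
    obtain ⟨hi, hhi⟩ : ∃ m, PySem.List.max? L (fun x => x) = some m := by
      cases h : PySem.List.max? L (fun x => x) with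
      | none => exact absurd ((PySem.List.max?_eq_none_iff L (fun x => x)).mp h) hne
      | some m => exact ⟨m, rfl⟩
    simp only [hlo, hhi, decide_eq_true_eq]
    constructor
    · rintro ⟨hlone, hlohi⟩
      -- all elements of L equal lo
      have hall : ∀ s ∈ L, s = lo := by
        intro s hs
        have h1 := PySem.List.min?_isMin hlo s hs
        have h2 := PySem.List.max?_isMax hhi s hs
        exact le_antisymm (hlohi ▸ h2) h1
      intro p hp
      have hpmem : String.mk (splitLeadingDir p.toList).1 ∈ L := by
        rw [hL]; exact List.mem_map.mpr ⟨p, hp, rfl⟩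
      have hpl := hall _ hpmem
      constructor
      · intro hnil
        exact hlone (by rw [← hpl, hnil]; rfl)
      · intro q hq
        have hqmem : String.mk (splitLeadingDir q.toList).1 ∈ L := by
          rw [hL]; exact List.mem_map.mpr ⟨q, hq, rfl⟩
        have := congrArg String.toList ((hall _ hqmem).trans hpl.symm)
        simpa [pvMkToList] using this
    · intro h
      have hx := h x (by simp)
      have hall : ∀ s ∈ L, s = String.mk (splitLeadingDir x.toList).1 := by
        intro s hs
        rw [hL] at hs
        obtain ⟨q, hq, rfl⟩ := List.mem_map.mp hs
        exact congrArg String.mk (hx.2 q hq)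
      have hlomem := PySem.List.min?_mem hlo
      have hhimem := PySem.List.max?_mem hhi
      have hloeq := hall _ hlomem
      have hhieq := hall _ hhimem
      refine ⟨?_, hloeq.trans hhieq.symm⟩
      intro hlo0
      apply hx.1
      have h0 := congrArg String.toList (hloeq ▸ hlo0 : String.mk (splitLeadingDir x.toList).1 = "")
      simpa [pvMkToList] using h0

-- ===== VERDICT =====
theorem has_leading_dir_spec : Claim_equal_has_leading_dir := by
  intro paths _
  unfold Spec_has_leading_dir has_leading_dir
  rw [Bool.eq_iff_iff, loop_none_iff, alt_iff]
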